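-- pv_equiv track=rewrite | github.com/Seohyun-0206/CodingTest | 프로그래머스/1/132267. 콜라 문제/콜라 문제.py | solution
-- ===== SOURCE A (Python) =====
-- def solution(a, b, n):
--     answer = 0
--     while n >= a:
--         d = n // a
--         e = n - d * a
--         n = d * b + e
--         answer += d * b
--
--     return answer
-- ===== SOURCE B (Python) =====
-- def solution(a, b, n):
--     if n < a:
--         return 0
--     return (n - b) // (a - b) * b
-- ===== Notes on version B (the rewrite author's own statement) =====
-- stated objective: simpler
-- what changed: Replaces the bottle-exchange simulation loop with the closed-form expression (n-b)//(a-b)*b (0 when n < a).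
-- outside the precondition, e.g. on solution(5, -1, 10): A returns -2, B returns -1; on solution(0, 0, 5): A raises ZeroDivisionError, B raises ZeroDivisionError; on solution(3, 3, 5): A does not finish within the time limit, B raises ZeroDivisionError
import Mathlib
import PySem

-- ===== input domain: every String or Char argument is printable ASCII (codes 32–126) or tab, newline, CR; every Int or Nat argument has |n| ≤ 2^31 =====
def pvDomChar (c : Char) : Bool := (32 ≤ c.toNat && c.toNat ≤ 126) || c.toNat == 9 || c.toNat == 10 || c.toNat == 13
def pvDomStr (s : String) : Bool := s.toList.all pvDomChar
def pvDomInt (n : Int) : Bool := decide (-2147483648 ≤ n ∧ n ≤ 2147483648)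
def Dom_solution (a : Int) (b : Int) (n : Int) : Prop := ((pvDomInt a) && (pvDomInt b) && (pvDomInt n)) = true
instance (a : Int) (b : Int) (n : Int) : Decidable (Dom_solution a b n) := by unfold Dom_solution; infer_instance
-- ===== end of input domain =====

-- B replaces A's exchange-simulation loop by the closed form (n-b)//(a-b)*b: simpler (no loop).


-- ===== PORT A =====
-- A's while loop, transliterated with a fuel bound; on every input admitted by
-- Pre_solution the loop runs at most n steps, so fuel n.toNat + 1 is never exhausted.
def solutionLoop (fuel : Nat) (a : Int) (b : Int) (n : Int) (answer : Int) : Int :=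
  match fuel with
  | 0 => answer
  | f + 1 =>
    if a ≤ n then
      let d := PySem.Int.floordiv n a
      let e := n - d * a
      solutionLoop f a b (d * b + e) (answer + d * b)
    else answer

def solution (a : Int) (b : Int) (n : Int) : Int :=
  solutionLoop (n.toNat + 1) a b n 0

-- ===== PORT B =====
def solution_alt (a : Int) (b : Int) (n : Int) : Int :=
  if n < a then 0
  else PySem.Int.floordiv (n - b) (a - b) * b

-- ===== PRECONDITION & SPEC =====
-- Pre_ restricts to the problem's natural domain 0 ≤ b < a (plus the trivial n < a
-- case, where A returns 0 for any a, b): for b ≥ a or a ≤ 0 with n ≥ a the loop in A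
-- diverges (or raises ZeroDivisionError when a = 0), and negative bottle prices b < 0
-- are outside the task's natural domain.
def Pre_solution (a : Int) (b : Int) (n : Int) : Prop :=
  n < a ∨ (0 ≤ b ∧ b < a)
instance (a : Int) (b : Int) (n : Int) : Decidable (Pre_solution a b n) := by
  unfold Pre_solution; infer_instance

def pvWitness_solution : Int × Int × Int := (2, 1, 20)

def Spec_solution (a : Int) (b : Int) (n : Int) (out : Int) : Prop := out = solution_alt a b n
instance (a : Int) (b : Int) (n : Int) (out : Int) : Decidable (Spec_solution a b n out) := by unfold Spec_solution; infer_instance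

-- ===== CLAIM (what is proved, stated in full; the proofs are below) =====
def Claim_equal_solution : Prop := ∀ (a : Int) (b : Int) (n : Int), Dom_solution a b n → Pre_solution a b n → Spec_solution a b n (solution a b n)

-- ===== LEMMAS AND PROOFS =====

-- Invariant of A's loop under 0 ≤ b < a: with enough fuel it returns
-- answer + (n-b)//(a-b)*b when n ≥ a, and answer when n < a.
theorem solutionLoop_closed (fuel : Nat) (a b : Int) (hb : 0 ≤ b) (hba : b < a) :
    ∀ (n answer : Int), n.toNat < fuel →
      solutionLoop fuel a b n answer =
        answer + (if a ≤ n then PySem.Int.floordiv (n - b) (a - b) * b else 0) := by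
  induction fuel with
  | zero => intro n answer h; omega
  | succ f ih =>
    intro n answer hfuel
    by_cases hn : a ≤ n
    · have ha : 0 < a := lt_of_le_of_lt hb hba
      have hc : 0 < a - b := by omega
      -- unfold one loop step
      simp only [solutionLoop, hn, if_pos]
      set d := PySem.Int.floordiv n a with hd
      have hdiv : d = n / a := PySem.Int.floordiv_eq_ediv_of_pos ha
      have hd1 : 1 ≤ d := by
        rw [hdiv]
        exact (Int.le_ediv_iff_mul_le ha).mpr (by omega)
      have hml : n / a * a ≤ n := Int.ediv_mul_le n (by omega)
      have hmu : n < (n / a + 1) * a := Int.lt_ediv_add_one_mul_self n ha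
      have hrem0 : 0 ≤ n - d * a := by rw [hdiv]; omega
      have hremlt : n - d * a < a := by rw [hdiv]; nlinarith
      set n' := d * b + (n - d * a) with hn'
      have hn'eq : n' = n - d * (a - b) := by ring
      -- enough fuel for the recursive call
      have hlt : n' < n := by
        have : 1 * 1 ≤ d * (a - b) := mul_le_mul hd1 (by omega) (by omega) (by omega)
        omega
      have hge0 : 0 ≤ n' := by
        have : 0 ≤ d * b := mul_nonneg (by omega) hb
        omega
      have hfuel' : n'.toNat < f := by omega
      rw [ih n' (answer + d * b) hfuel']
      -- floordiv shift: (n'-b)//(a-b) = (n-b)//(a-b) - d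
      have hshift : PySem.Int.floordiv (n' - b) (a - b) =
          PySem.Int.floordiv (n - b) (a - b) - d := by
        rw [PySem.Int.floordiv_eq_ediv_of_pos hc, PySem.Int.floordiv_eq_ediv_of_pos hc]
        have : n' - b = (n - b) + (-d) * (a - b) := by rw [hn'eq]; ring
        rw [this, Int.add_mul_ediv_right _ _ (by omega : a - b ≠ 0)]
        ring
      by_cases hn2 : a ≤ n'
      · simp only [hn2, if_pos, hshift]; ring
      · -- loop ends: show (n-b)//(a-b) = d, i.e. b ≤ n' < a
        have hbn' : b ≤ n' := by
          have : 1 * b ≤ d * b := mul_le_mul_of_nonneg_right hd1 hb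
          omega
        have hq : PySem.Int.floordiv (n' - b) (a - b) = 0 := by
          rw [PySem.Int.floordiv_eq_ediv_of_pos hc]
          apply Int.ediv_eq_zero_of_lt <;> omega
        have : PySem.Int.floordiv (n - b) (a - b) = d := by omega
        simp only [hn2, if_neg, this, not_false_iff]
        ring
    · simp [solutionLoop, hn]

-- ===== VERDICT (by name: the statement is the Claim_ definition above) =====
theorem solution_spec : Claim_equal_solution := by
  unfold Claim_equal_solution
  intro a b n _ hpre
  unfold Spec_solution solution solution_alt
  rcases hpre with hlt | ⟨hb, hba⟩
  · have : ¬ a ≤ n := by omega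
    simp [solutionLoop, this, hlt]
  · rw [solutionLoop_closed (n.toNat + 1) a b hb hba n 0 (by omega)]
    by_cases hn : a ≤ n
    · simp [hn, show ¬ n < a by omega]
    · simp [hn, show n < a by omega]
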